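-- pv_equiv track=rewrite | github.com/hello-Ryan/alg-ds | gusfields_z-algorithm.py | z_alg
-- ===== SOURCE A (Python) =====
-- def z_values(text):
--     text_size = len(text)
--     z_array = [0] * text_size
--     z_array[0] = text_size
--     l,r = 0,0
--     k = 0
--
--     for i in range(1,text_size):
--
--         # * case 1 naive pattern matching
--         if i > r:
--             l,r = i, i
--
--             while r < text_size and text[r-l] == text[r]:
--                 r += 1
--             z_array[i] = r - l
--             r -= 1
--
--         # * case 2
--         else:
--             k = i - l
--
--             # * case 2A (z box less than right boundary)
--             if z_array[k] < r - i + 1: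
--                 z_array[i] = z_array[k]
--
--             # * case 2B (at the right boundary or over)
--             else:
--                 l = i
--                 while r < text_size and text[r-l] == text[r]:
--                     r += 1
--                 z_array[i] = r - l
--                 r -= 1
--
--     return z_array
--
-- def z_alg(pattern,text):
--     new_string = pattern +'$'+ text
--
--     pattern_size = len(pattern)
--
--     # O(m + n) where m and n are the length of the pattern and text respectively
--     z_vals = z_values(new_string)
--
--     matches = []
--
--     # O(n) where n is the length of the text
--     for i in range(pattern_size, len(new_string)):
--
--         if z_vals[i] == pattern_size:
--             matches.append([i-pattern_size-1, i-2])
--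
--     return matches
-- ===== SOURCE B (Python) =====
-- def z_alg(pattern, text):
--     m = len(pattern)
--     matches = []
--     for start in range(len(text)):
--         if text[start:start+m] == pattern:
--             matches.append([start, start+m-1])
--     return matches
-- ===== Notes on version B (the rewrite author's own statement) =====
-- stated objective: simpler
-- what changed: Replaced the Z-array machinery (sentinel concatenation, z-box maintenance, match scan) with direct naive substring matching: for each start position compare text[start:start+m] with the pattern.
-- intended difference: When '$' occurs so that pattern+'$' is a substring of text, or pattern = '$'+p with p a prefix of text not followed by '$', A's '$'-sentinel collides with the input: A drops the real occurrence followed by '$' (resp. invents a bogus match [-1, m-2]), while B reports exactly the true occurrences, which is the intended behaviour. — e.g. on z_alg("$", ""): A returns [[-1, -1]], B returns []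
import Mathlib
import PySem

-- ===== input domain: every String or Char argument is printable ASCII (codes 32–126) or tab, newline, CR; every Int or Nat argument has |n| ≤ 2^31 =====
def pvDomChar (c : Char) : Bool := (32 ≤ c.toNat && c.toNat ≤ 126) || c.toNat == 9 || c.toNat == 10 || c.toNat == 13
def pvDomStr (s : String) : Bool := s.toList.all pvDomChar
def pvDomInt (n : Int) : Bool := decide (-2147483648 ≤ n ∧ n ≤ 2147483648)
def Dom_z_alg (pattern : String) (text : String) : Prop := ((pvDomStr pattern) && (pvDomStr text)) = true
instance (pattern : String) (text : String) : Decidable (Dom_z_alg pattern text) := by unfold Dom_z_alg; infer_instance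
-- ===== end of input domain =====

-- B replaces A's '$'-sentinel Z-array algorithm by direct naive substring matching (simpler);
-- where the sentinel collides with '$' in the input A misreports matches, stated below as D_z_alg.

-- ===== PORT A =====
-- the inner `while r < text_size and text[r-l] == text[r]: r += 1` of z_values;
-- both indexings are in range whenever the while condition is evaluated (l ≤ r < text_size),
-- so getElem? equality is exact.
def zExtend (s : List Char) (l : Nat) (r : Nat) : Nat :=
  if h : r < s.length ∧ s[r - l]? = s[r]? then zExtend s l (r + 1) else r
termination_by s.length - r
decreasing_by omega

-- the `for i in range(1, text_size)` loop of z_values, state (z_array, l, r);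
-- `k` is assigned before its only use, so it is kept local to the branch.
def zLoop (s : List Char) (n : Nat) (z : List Int) (l : Nat) (r : Nat) (i : Nat) : List Int :=
  if i < n then
    if r < i then          -- case 1 (Python: i > r)
      let r' := zExtend s i i
      zLoop s n (z.set i ((r' - i : Nat) : Int)) i (r' - 1) (i + 1)
    else
      let k := i - l
      if z.getD k 0 < (r : Int) - (i : Int) + 1 then   -- case 2A
        zLoop s n (z.set i (z.getD k 0)) l r (i + 1)
      else                  -- case 2B
        let r' := zExtend s i r
        zLoop s n (z.set i ((r' - i : Nat) : Int)) i (r' - 1) (i + 1)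
  else z
termination_by n - i

-- z_values; Python's `z_array[0] = text_size` raises IndexError on the empty string, but
-- z_alg always calls it on pattern+'$'+text, which is nonempty, so the port is exact there.
def z_values (s : List Char) : List Int :=
  let n := s.length
  let z := (List.replicate n (0 : Int)).set 0 (n : Int)
  zLoop s n z 0 0 1

def z_alg (pattern : String) (text : String) : List (List Int) :=
  let s := pattern.toList ++ '$' :: text.toList      -- new_string = pattern + '$' + text
  let m := pattern.toList.length                      -- pattern_size
  let zv := z_values s
  (List.range' m (s.length - m)).foldl                -- for i in range(pattern_size, len(new_string))
    (fun acc i => if zv.getD i 0 = (m : Int) then acc ++ [[(i : Int) - m - 1, (i : Int) - 2]] else acc) []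

-- ===== PORT B =====
-- text[start:start+m] with 0 ≤ start < len(text) and m ≥ 0 is exactly (drop start).take m.
def z_alg_alt (pattern : String) (text : String) : List (List Int) :=
  let p := pattern.toList
  let t := text.toList
  let m := p.length
  (List.range t.length).foldl
    (fun acc start =>
      if (t.drop start).take m = p then acc ++ [[(start : Int), (start : Int) + m - 1]] else acc) []

-- ===== PRECONDITION & SPEC =====
-- On inputs where pattern+'$' occurs inside text, or pattern = '$'+p with p a prefix of text not
-- immediately followed by '$', A's '$'-sentinel collides with the input: A silently drops the real
-- occurrence followed by '$' (resp. adds a bogus match [-1, m-2]); B returns exactly the true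
-- occurrences, which is the intended behaviour.
-- "pattern ++ ['$'] occurs as a contiguous substring of u": ahead = u.drop pattern.length walks
-- pattern.length positions in front, so the prefix test runs only where an occurrence would end
-- in '$' (this keeps deciding D_ cheap even on large inputs)
def dollarScan (p : List Char) : List Char → List Char → Bool
  | _, [] => false
  | u, c :: ahead => (c = '$' && p.isPrefixOf u) || dollarScan p u.tail ahead

def D_z_alg (pattern : String) (text : String) : Prop :=
  dollarScan pattern.toList text.toList (text.toList.drop pattern.toList.length) = true ∨
  (pattern.toList.head? = some '$' ∧ pattern.toList.tail.isPrefixOf text.toList = true ∧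
    (pattern.toList.tail ++ ['$']).isPrefixOf text.toList = false)
instance (pattern : String) (text : String) : Decidable (D_z_alg pattern text) := by
  unfold D_z_alg; infer_instance

def Spec_z_alg (pattern : String) (text : String) (out : List (List Int)) : Prop :=
  ¬ D_z_alg pattern text → out = z_alg_alt pattern text
instance (pattern : String) (text : String) (out : List (List Int)) : Decidable (Spec_z_alg pattern text out) := by
  unfold Spec_z_alg; infer_instance

def pvDiffWitness_z_alg : String × String := ("$", "")
def pvDiffWitnessOut_z_alg : (List (List Int)) × (List (List Int)) := ([[-1, -1]], [])

-- ===== CLAIM (what is proved, stated in full; the proofs are below) =====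
def Claim_unchanged_z_alg : Prop := ∀ (pattern : String) (text : String), Dom_z_alg pattern text → Spec_z_alg pattern text (z_alg pattern text)
def Claim_exact_z_alg : Prop := ∀ (pattern : String) (text : String), Dom_z_alg pattern text → D_z_alg pattern text → z_alg pattern text ≠ z_alg_alt pattern text
def Claim_changed_z_alg : Prop := Dom_z_alg (pvDiffWitness_z_alg.1) (pvDiffWitness_z_alg.2) ∧ D_z_alg (pvDiffWitness_z_alg.1) (pvDiffWitness_z_alg.2) ∧ z_alg (pvDiffWitness_z_alg.1) (pvDiffWitness_z_alg.2) = pvDiffWitnessOut_z_alg.1 ∧ z_alg_alt (pvDiffWitness_z_alg.1) (pvDiffWitness_z_alg.2) = pvDiffWitnessOut_z_alg.2 ∧ pvDiffWitnessOut_z_alg.1 ≠ pvDiffWitnessOut_z_alg.2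

-- ===== LEMMAS AND PROOFS =====

def lcp : List Char → List Char → Nat
  | a :: as, b :: bs => if a = b then lcp as bs + 1 else 0
  | _, _ => 0

theorem lcp_le_right (a b : List Char) : lcp a b ≤ b.length := by
  induction a generalizing b with
  | nil => cases b <;> simp [lcp]
  | cons x xs ih =>
    cases b with
    | nil => simp [lcp]
    | cons y ys => simp only [lcp]; split_ifs <;> simp <;> exact ih ys

theorem lcp_take (a b : List Char) : a.take (lcp a b) = b.take (lcp a b) := by
  induction a generalizing b with
  | nil => cases b <;> simp [lcp]
  | cons x xs ih =>
    cases b with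
    | nil => simp [lcp]
    | cons y ys =>
      simp only [lcp]; split_ifs with h
      · subst h; simp [ih ys]
      · simp

theorem lcp_get (a b : List Char) (c : Char) (h : a[lcp a b]? = some c) :
    b[lcp a b]? ≠ some c := by
  induction a generalizing b with
  | nil => simp [lcp] at h
  | cons x xs ih =>
    cases b with
    | nil => simp [lcp]
    | cons y ys =>
      simp only [lcp] at *
      split_ifs at * with hxy
      · simpa using ih ys (by simpa using h)
      · simp at h; subst h; simp; intro hyc; exact hxy hyc.symm

theorem lcp_ge (a b : List Char) (k : Nat) (ha : k ≤ a.length) (hb : k ≤ b.length)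
    (h : a.take k = b.take k) : k ≤ lcp a b := by
  induction a generalizing b k with
  | nil => simp at ha; omega
  | cons x xs ih =>
    cases k with
    | zero => omega
    | succ k =>
      cases b with
      | nil => simp at hb
      | cons y ys =>
        simp only [List.take_succ_cons, List.cons.injEq] at h
        simp only [lcp, h.1, if_pos]
        have := ih ys k (by simpa using ha) (by simpa using hb) h.2
        omega

theorem lcp_getElem? (a b : List Char) (j : Nat) (hj : j < lcp a b) : a[j]? = b[j]? := by
  have h := lcp_take a b
  have h1 : a[j]? = (a.take (lcp a b))[j]? := (List.getElem?_take_of_lt hj).symm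
  have h2 : b[j]? = (b.take (lcp a b))[j]? := (List.getElem?_take_of_lt hj).symm
  rw [h1, h2, h]

theorem lcp_eq_of (a b : List Char) (k : Nat) (c : Char) (h : a.take k = b.take k)
    (ha : a[k]? = some c) (hb : b[k]? ≠ some c) : lcp a b = k := by
  have hka : k < a.length := by
    by_contra hk
    rw [List.getElem?_eq_none (by omega)] at ha; simp at ha
  have hkb : k ≤ b.length := by
    have := congrArg List.length h
    simp [List.length_take] at this; omega
  have hge := lcp_ge a b k (le_of_lt hka) hkb h
  rcases lt_or_eq_of_le hge with hlt | he
  · exact absurd (by rw [← lcp_getElem? a b k hlt]; exact ha) hb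
  · omega

theorem lcp_congr (a b b' : List Char) (c : Nat) (h : b.take c = b'.take c)
    (hl : lcp a b < c) : lcp a b' = lcp a b := by
  induction a generalizing b b' c with
  | nil => cases b' <;> cases b <;> simp [lcp]
  | cons x xs ih =>
    cases b with
    | nil =>
      cases c with
      | zero => omega
      | succ c =>
        simp at h
        cases b' with
        | nil => rfl
        | cons y ys => simp at h
    | cons y ys =>
      cases c with
      | zero => omega
      | succ c =>
        cases b' with
        | nil => simp at h
        | cons y' ys' =>
          simp only [List.take_succ_cons, List.cons.injEq] at h
          obtain ⟨rfl, h2⟩ := h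
          simp only [lcp] at *
          split_ifs at * with hxy
          · have := ih ys ys' c h2 (by omega)
            omega
          · rfl

def Zf (s : List Char) (i : Nat) : Nat := lcp s (s.drop i)

theorem Zf_le (s : List Char) (i : Nat) : Zf s i ≤ s.length - i := by
  have := lcp_le_right s (s.drop i)
  simpa [Zf] using this

theorem zExtend_eq (s : List Char) (l r : Nat) (hlr : l ≤ r)
    (h : r - l ≤ lcp s (s.drop l)) : zExtend s l r = l + lcp s (s.drop l) := by
  rw [zExtend.eq_def]
  by_cases hcase : r - l < lcp s (s.drop l)
  · have hrl : s[r - l]? = (s.drop l)[r - l]? := lcp_getElem? s (s.drop l) (r - l) hcase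
    have hlen : lcp s (s.drop l) ≤ (s.drop l).length := lcp_le_right _ _
    have hrn : r < s.length := by simp [List.length_drop] at hlen; omega
    have hsr : (s.drop l)[r - l]? = s[r]? := by
      rw [List.getElem?_drop]; congr 1; omega
    rw [dif_pos ⟨hrn, by rw [hrl, hsr]⟩]
    exact zExtend_eq s l (r + 1) (by omega) (by omega)
  · rw [dif_neg]; · omega
    rintro ⟨hrn, hcond⟩
    have hrlL : r - l = lcp s (s.drop l) := by omega
    have hrlt : r - l < s.length := by omega
    have hsome : s[r - l]? = some s[r - l] := List.getElem?_eq_getElem hrlt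
    have hmis := lcp_get s (s.drop l) s[r - l] (by rw [← hrlL] at *; exact hsome)
    apply hmis
    rw [← hrlL, List.getElem?_drop, show l + (r - l) = r from by omega, ← hcond]
    exact hsome
termination_by s.length - r
decreasing_by omega

theorem box_shift (s : List Char) (l k : Nat) :
    (s.drop (l + k)).take (Zf s l - k) = (s.drop k).take (Zf s l - k) := by
  have h := lcp_take s (s.drop l)
  have h2 := congrArg (List.drop k) h
  rw [List.drop_take, List.drop_take, List.drop_drop] at h2
  exact h2.symm

theorem case2A (s : List Char) (l k : Nat) (h : k + Zf s k < Zf s l) :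
    Zf s (l + k) = Zf s k := by
  unfold Zf
  exact lcp_congr s (s.drop k) (s.drop (l + k)) (Zf s l - k)
    (box_shift s l k).symm (by unfold Zf at h ⊢; omega)

theorem case2B_pre (s : List Char) (l k : Nat) (h : Zf s l ≤ k + Zf s k) (hk : k ≤ Zf s l) :
    Zf s l - k ≤ Zf s (l + k) := by
  have hbox := box_shift s l k
  have htk : (s.drop k).take (Zf s l - k) = s.take (Zf s l - k) := by
    have h1 := lcp_take s (s.drop k)
    have h2 := congrArg (List.take (Zf s l - k)) h1
    rw [List.take_take, List.take_take] at h2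
    rw [show min (Zf s l - k) (lcp s (s.drop k)) = Zf s l - k from by
      have : lcp s (s.drop k) = Zf s k := rfl; omega] at h2
    exact h2.symm
  have hZl := Zf_le s l
  apply lcp_ge
  · omega
  · simp [List.length_drop]; omega
  · rw [← htk, ← hbox]

theorem getD_set_self (z : List Int) (i : Nat) (v : Int) (h : i < z.length) :
    (z.set i v).getD i 0 = v := by
  simp [List.getD, h]

theorem getD_set_ne (z : List Int) (i j : Nat) (v : Int) (h : i ≠ j) :
    (z.set i v).getD j 0 = z.getD j 0 := by
  simp [List.getD, h]

theorem zLoop_correct (s : List Char) (n : Nat) (hn : n = s.length)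
    (i l r : Nat) (z : List Int) (hi : 1 ≤ i)
    (hlen : z.length = n)
    (hprev : ∀ j, 1 ≤ j → j < i → z.getD j 0 = (Zf s j : Int))
    (hbox : i ≤ r → 1 ≤ l ∧ l < i ∧ r + 1 = l + Zf s l) :
    ∀ j, 1 ≤ j → j < n → (zLoop s n z l r i).getD j 0 = (Zf s j : Int) := by
  intro j hj1 hjn
  rw [zLoop.eq_def]
  by_cases hin : i < n
  · rw [if_pos hin]
    by_cases hri : r < i
    · rw [if_pos hri]
      have he : zExtend s i i = i + Zf s i := zExtend_eq s i i le_rfl (by simp)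
      simp only [he]
      have hv : ((i + Zf s i - i : Nat) : Int) = (Zf s i : Int) := by
        congr 1; omega
      refine zLoop_correct s n hn (i + 1) i (i + Zf s i - 1) _ (by omega)
        (by simp [hlen]) ?_ ?_ j hj1 hjn
      · intro j' hj'1 hj'i
        by_cases hji : j' = i
        · subst hji; rw [getD_set_self _ _ _ (by omega), hv]
        · rw [getD_set_ne _ _ _ _ (Ne.symm hji)]; exact hprev j' hj'1 (by omega)
      · intro _
        refine ⟨by omega, by omega, by omega⟩
    · rw [if_neg hri]
      obtain ⟨hl1, hli, hr⟩ := hbox (by omega)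
      have hk1 : 1 ≤ i - l := by omega
      have hki : i - l < i := by omega
      have hzk : z.getD (i - l) 0 = (Zf s (i - l) : Int) := hprev _ hk1 hki
      have hilk : i = l + (i - l) := by omega
      have hkZl : i - l ≤ Zf s l := by omega
      by_cases hc : z.getD (i - l) 0 < (r : Int) - (i : Int) + 1
      · rw [if_pos hc]
        rw [hzk] at hc
        have hcn : (i - l) + Zf s (i - l) < Zf s l := by
          have : (Zf s (i - l) : Int) < (Zf s l : Int) - (i - l : Nat) := by push_cast; omega
          omega
        have hZi : Zf s i = Zf s (i - l) := by
          have h0 := case2A s l (i - l) hcn; rwa [← hilk] at h0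
        refine zLoop_correct s n hn (i + 1) l r _ (by omega) (by simp [hlen]) ?_ ?_ j hj1 hjn
        · intro j' hj'1 hj'i
          by_cases hji : j' = i
          · subst hji; rw [getD_set_self _ _ _ (by omega), hzk, hZi]
          · rw [getD_set_ne _ _ _ _ (Ne.symm hji)]; exact hprev j' hj'1 (by omega)
        · intro hir
          exact ⟨hl1, by omega, hr⟩
      · rw [if_neg hc]
        rw [hzk] at hc
        have hcn : Zf s l ≤ (i - l) + Zf s (i - l) := by
          have : (Zf s l : Int) - (i - l : Nat) ≤ (Zf s (i - l) : Int) := by push_cast at hc ⊢; omega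
          omega
        have hpre : Zf s l - (i - l) ≤ Zf s i := by
          have h0 := case2B_pre s l (i - l) hcn hkZl; rwa [← hilk] at h0
        have he : zExtend s i r = i + Zf s i :=
          zExtend_eq s i r (by omega) (by have hr' := hr; have hp' := hpre; simp only [Zf] at hr' hp'; omega)
        simp only [he]
        have hv : ((i + Zf s i - i : Nat) : Int) = (Zf s i : Int) := by congr 1; omega
        refine zLoop_correct s n hn (i + 1) i (i + Zf s i - 1) _ (by omega)
          (by simp [hlen]) ?_ ?_ j hj1 hjn
        · intro j' hj'1 hj'i
          by_cases hji : j' = i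
          · subst hji; rw [getD_set_self _ _ _ (by omega), hv]
          · rw [getD_set_ne _ _ _ _ (Ne.symm hji)]; exact hprev j' hj'1 (by omega)
        · intro _
          refine ⟨by omega, by omega, by omega⟩
  · rw [if_neg hin]
    exact hprev j hj1 (by omega)
termination_by n - i

theorem zLoop_getD_zero (s : List Char) (n : Nat) (i l r : Nat) (z : List Int) (hi : 1 ≤ i) :
    (zLoop s n z l r i).getD 0 0 = z.getD 0 0 := by
  rw [zLoop.eq_def]
  by_cases hin : i < n
  · rw [if_pos hin]
    by_cases hri : r < i
    · rw [if_pos hri]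
      rw [zLoop_getD_zero s n (i + 1) _ _ _ (by omega), getD_set_ne _ _ _ _ (by omega)]
    · rw [if_neg hri]
      by_cases hc : z.getD (i - l) 0 < (r : Int) - (i : Int) + 1
      · rw [if_pos hc, zLoop_getD_zero s n (i + 1) _ _ _ (by omega),
          getD_set_ne _ _ _ _ (by omega)]
      · rw [if_neg hc, zLoop_getD_zero s n (i + 1) _ _ _ (by omega),
          getD_set_ne _ _ _ _ (by omega)]
  · rw [if_neg hin]
termination_by n - i

theorem z_values_getD (s : List Char) (hs : s ≠ []) (j : Nat) (hj : j < s.length) :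
    (z_values s).getD j 0 = if j = 0 then (s.length : Int) else (Zf s j : Int) := by
  have hn : 1 ≤ s.length := List.length_pos_iff.mpr hs
  unfold z_values
  split_ifs with h0
  · subst h0
    rw [zLoop_getD_zero s s.length 1 0 0 _ le_rfl,
      getD_set_self _ _ _ (by simp; omega)]
  · exact zLoop_correct s s.length rfl 1 0 0 _ le_rfl (by simp)
      (by intro j' h1 h2; omega) (by intro h; omega) j (by omega) hj
theorem s_take (p t : List Char) : (p ++ '$' :: t).take p.length = p := List.take_left
theorem s_getm (p t : List Char) : (p ++ '$' :: t)[p.length]? = some '$' := by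
  rw [List.getElem?_append_right le_rfl]; simp

theorem Zf_eq_m_iff (p t : List Char) (i : Nat) :
    Zf (p ++ '$' :: t) i = p.length ↔
      ((p ++ '$' :: t).drop i).take p.length = p ∧
        ((p ++ '$' :: t).drop i)[p.length]? ≠ some '$' := by
  set s := p ++ '$' :: t with hs
  constructor
  · intro h
    unfold Zf at h
    constructor
    · have := lcp_take s (s.drop i)
      rw [h] at this
      rw [← this, s_take]
    · have hm := lcp_get s (s.drop i) '$' (by rw [h]; exact s_getm p t)
      rwa [h] at hm
  · rintro ⟨h1, h2⟩
    exact lcp_eq_of s (s.drop i) p.length '$' (by rw [s_take, h1]) (s_getm p t) h2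

theorem foldl_app_if (P : Nat → Prop) [DecidablePred P] (f : Nat → List Int)
    (xs : List Nat) (acc : List (List Int)) :
    xs.foldl (fun acc x => if P x then acc ++ [f x] else acc) acc
      = acc ++ (xs.filter (fun x => decide (P x))).map f := by
  induction xs generalizing acc with
  | nil => simp
  | cons x xs ih =>
    simp only [List.foldl_cons, List.filter_cons]
    by_cases h : P x
    · simp [h, ih]
    · simp [h, ih]
theorem drop_s_m (p t : List Char) : (p ++ '$' :: t).drop p.length = '$' :: t :=
  List.drop_left
theorem drop_s_mj (p t : List Char) (j : Nat) :
    (p ++ '$' :: t).drop (p.length + 1 + j) = t.drop j := by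
  have h1 : (p ++ '$' :: t) = (p ++ ['$']) ++ t := by simp
  rw [h1, ← List.drop_drop, List.drop_left' (by simp)]

theorem prefix_append_dollar_iff (p u : List Char) :
    (p ++ ['$']) <+: u ↔ p <+: u ∧ u[p.length]? = some '$' := by
  constructor
  · rintro ⟨v, rfl⟩
    constructor
    · exact ⟨['$'] ++ v, by simp⟩
    · rw [List.append_assoc, List.getElem?_append_right le_rfl]; simp
  · rintro ⟨⟨v, rfl⟩, hm⟩
    rw [List.getElem?_append_right le_rfl, Nat.sub_self] at hm
    obtain ⟨v', rfl⟩ : ∃ v', v = '$' :: v' := by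
      cases v with
      | nil => simp at hm
      | cons a v' => simp at hm; exact ⟨v', by rw [hm]⟩
    exact ⟨v', by simp⟩

theorem Pam_iff (p t : List Char) :
    ((z_values (p ++ '$' :: t)).getD p.length 0 = (p.length : Int)) ↔
      (p.head? = some '$' ∧ p.tail <+: t ∧ ¬ (p.tail ++ ['$']) <+: t) := by
  have hsne : (p ++ '$' :: t) ≠ [] := by simp
  have hslen : (p ++ '$' :: t).length = p.length + 1 + t.length := by simp; omega
  rw [z_values_getD _ hsne p.length (by omega)]
  cases p with
  | nil =>
    simp only [List.length_nil]
    constructor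
    · intro h; rw [hslen] at h; simp at h; omega
    · intro h; simp at h
  | cons c p' =>
    rw [if_neg (by simp)]
    rw [show (((Zf ((c :: p') ++ '$' :: t) (c :: p').length : Int) = ((c :: p').length : Int)) ↔
        (Zf ((c :: p') ++ '$' :: t) (c :: p').length = (c :: p').length)) from by exact_mod_cast Iff.rfl]
    rw [Zf_eq_m_iff, drop_s_m]
    simp only [List.length_cons, List.take_succ_cons, List.cons.injEq, List.getElem?_cons_succ,
      List.head?_cons, List.tail_cons, Option.some.injEq]
    rw [prefix_append_dollar_iff, List.prefix_iff_eq_take]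
    constructor
    · rintro ⟨⟨hc, hp'⟩, h2⟩
      exact ⟨hc.symm, hp'.symm, fun h => h2 (by rw [← hp'.symm] at h; exact h.2)⟩
    · rintro ⟨hc, hp', h2⟩
      refine ⟨⟨hc.symm, hp'.symm⟩, ?_⟩
      intro habs
      exact h2 ⟨hp', habs⟩

theorem match_cond (p t : List Char) (j : Nat) (hj : j < t.length) :
    ((z_values (p ++ '$' :: t)).getD (p.length + 1 + j) 0 = (p.length : Int)) ↔
      ((t.drop j).take p.length = p ∧ (t.drop j)[p.length]? ≠ some '$') := by
  have hsne : (p ++ '$' :: t) ≠ [] := by simp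
  have hslen : (p ++ '$' :: t).length = p.length + 1 + t.length := by simp; omega
  rw [z_values_getD _ hsne (p.length + 1 + j) (by omega), if_neg (by omega)]
  rw [show ((Zf (p ++ '$' :: t) (p.length + 1 + j) : Int) = (p.length : Int)) ↔
      (Zf (p ++ '$' :: t) (p.length + 1 + j) = p.length) from by exact_mod_cast Iff.rfl]
  rw [Zf_eq_m_iff, drop_s_mj]

theorem main_lists (p t : List Char)
    (hD1 : ¬ (p ++ ['$']) <:+: t)
    (hD2 : ¬ (p.head? = some '$' ∧ p.tail <+: t ∧ ¬ (p.tail ++ ['$']) <+: t)) :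
    (List.range' p.length ((p ++ '$' :: t).length - p.length)).foldl
      (fun acc i => if (z_values (p ++ '$' :: t)).getD i 0 = (p.length : Int) then
          acc ++ [[(i : Int) - p.length - 1, (i : Int) - 2]] else acc) []
    = (List.range t.length).foldl
      (fun acc start => if (t.drop start).take p.length = p then
          acc ++ [[(start : Int), (start : Int) + p.length - 1]] else acc) [] := by
  have hsne : (p ++ '$' :: t) ≠ [] := by simp
  have hslen : (p ++ '$' :: t).length = p.length + 1 + t.length := by simp; omega
  -- the match test at i = pattern_size fails (no bogus match at position -1) given ¬ D2
  have hPam : ¬ ((z_values (p ++ '$' :: t)).getD p.length 0 = (p.length : Int)) :=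
    fun h => hD2 ((Pam_iff p t).mp h)
  -- pointwise agreement of the two match tests inside the text, given ¬ D1
  have key : ∀ j, j < t.length →
      (((z_values (p ++ '$' :: t)).getD (p.length + 1 + j) 0 = (p.length : Int)) ↔
        ((t.drop j).take p.length = p)) := by
    intro j hj
    rw [match_cond p t j hj]
    constructor
    · exact fun h => h.1
    · intro h
      refine ⟨h, ?_⟩
      intro habs
      apply hD1
      have hlen : p.length ≤ (t.drop j).length := by
        have := congrArg List.length h
        simp [List.length_take, List.length_drop] at this ⊢; omega
      have htake : (t.drop j).take (p.length + 1) = p ++ ['$'] := by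
        rw [List.take_add_one, h, habs]; rfl
      have h1 : (t.drop j).take (p.length + 1) <+: t.drop j := List.take_prefix _ _
      have h2 : t.drop j <:+ t := List.drop_suffix _ _
      rw [htake] at h1
      exact h1.isInfix.trans h2.isInfix
  -- reshape both folds into filter-and-map over ranges and compare pointwise
  rw [foldl_app_if (fun i => (z_values (p ++ '$' :: t)).getD i 0 = (p.length : Int))
      (fun i => [(i : Int) - p.length - 1, (i : Int) - 2]),
    foldl_app_if (fun start => (t.drop start).take p.length = p)
      (fun start => [(start : Int), (start : Int) + p.length - 1])]
  simp only [List.nil_append]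
  rw [show (p ++ '$' :: t).length - p.length = t.length + 1 from by omega,
    List.range'_succ, List.filter_cons_of_neg (by simpa using hPam)]
  rw [show List.range' (p.length + 1) t.length
      = (List.range t.length).map (fun j => p.length + 1 + j) from by
    rw [List.range'_eq_map_range]]
  rw [List.filter_map, List.map_map]
  have hfilter : (List.range t.length).filter
      ((fun i => decide ((z_values (p ++ '$' :: t)).getD i 0 = (p.length : Int))) ∘
        (fun j => p.length + 1 + j))
      = (List.range t.length).filter
          (fun start => decide ((t.drop start).take p.length = p)) := by
    apply List.filter_congr
    intro j hj
    simp only [Function.comp_apply, decide_eq_decide]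
    exact key j (by simpa using hj)
  rw [hfilter]
  apply List.map_congr_left
  intro j hj
  simp only [Function.comp_apply]
  have h1 : ((p.length + 1 + j : Nat) : Int) - p.length - 1 = (j : Int) := by push_cast; ring
  have h2 : ((p.length + 1 + j : Nat) : Int) - 2 = (j : Int) + p.length - 1 := by push_cast; ring
  rw [h1, h2]

theorem dollarScan_iff (p u : List Char) :
    dollarScan p u (u.drop p.length) = true ↔ (p ++ ['$']) <:+: u := by
  induction u with
  | nil =>
    simp only [List.drop_nil, dollarScan]
    constructor
    · intro h; cases h
    · intro h
      have := h.length_le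
      simp at this
  | cons a u ih =>
    by_cases hlen : (a :: u).length ≤ p.length
    · rw [List.drop_eq_nil_of_le hlen]
      constructor
      · intro h; simp [dollarScan] at h
      · intro h
        exfalso
        have hle := h.length_le
        simp at hle hlen
        omega
    · have hlt : p.length < (a :: u).length := by omega
      obtain ⟨d, hd⟩ : ∃ d, (a :: u)[p.length]? = some d :=
        ⟨(a :: u)[p.length], List.getElem?_eq_getElem hlt⟩
      have hgd : (a :: u)[p.length] = d := by
        rw [List.getElem?_eq_getElem hlt] at hd
        injection hd
      have hdrop : (a :: u).drop p.length = d :: ((a :: u).drop (p.length + 1)) := by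
        rw [List.drop_eq_getElem_cons hlt, hgd]
      rw [hdrop]
      have htail : (a :: u).drop (p.length + 1) = u.drop p.length := List.drop_succ_cons

      simp only [dollarScan, List.tail_cons, htail, Bool.or_eq_true, Bool.and_eq_true,
        decide_eq_true_eq, List.isPrefixOf_iff_prefix, ih]
      rw [List.infix_cons_iff]
      constructor
      · rintro (⟨rfl, hp⟩ | h)
        · exact Or.inl ((prefix_append_dollar_iff p (a :: u)).mpr ⟨hp, hd⟩)
        · exact Or.inr h
      · rintro (h | h)
        · obtain ⟨hp, hm⟩ := (prefix_append_dollar_iff p (a :: u)).mp h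
          rw [hd] at hm
          exact Or.inl ⟨Option.some.inj hm, hp⟩
        · exact Or.inr h

theorem isPrefixOf_false_iff (w t : List Char) :
    w.isPrefixOf t = false ↔ ¬ w <+: t := by
  rw [← List.isPrefixOf_iff_prefix, Bool.eq_false_iff, ne_eq]

theorem tight_lists (p t : List Char)
    (hd : (p ++ ['$']) <:+: t ∨
      (p.head? = some '$' ∧ p.tail <+: t ∧ ¬ (p.tail ++ ['$']) <+: t)) :
    (List.range' p.length ((p ++ '$' :: t).length - p.length)).foldl
      (fun acc i => if (z_values (p ++ '$' :: t)).getD i 0 = (p.length : Int) then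
          acc ++ [[(i : Int) - p.length - 1, (i : Int) - 2]] else acc) []
    ≠ (List.range t.length).foldl
      (fun acc start => if (t.drop start).take p.length = p then
          acc ++ [[(start : Int), (start : Int) + p.length - 1]] else acc) [] := by
  have hslen : (p ++ '$' :: t).length = p.length + 1 + t.length := by simp; omega
  rw [foldl_app_if (fun i => (z_values (p ++ '$' :: t)).getD i 0 = (p.length : Int))
      (fun i => [(i : Int) - p.length - 1, (i : Int) - 2]),
    foldl_app_if (fun start => (t.drop start).take p.length = p)
      (fun start => [(start : Int), (start : Int) + p.length - 1])]
  simp only [List.nil_append]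
  by_cases hd2 : p.head? = some '$' ∧ p.tail <+: t ∧ ¬ (p.tail ++ ['$']) <+: t
  · -- A carries the bogus entry [-1, m-2]; every entry of B starts with a nonnegative index
    intro heq
    have hPam : (z_values (p ++ '$' :: t)).getD p.length 0 = (p.length : Int) :=
      (Pam_iff p t).mpr hd2
    have hmem : [(p.length : Int) - p.length - 1, (p.length : Int) - 2] ∈
        ((List.range' p.length ((p ++ '$' :: t).length - p.length)).filter
          (fun i => decide ((z_values (p ++ '$' :: t)).getD i 0 = (p.length : Int)))).map
          (fun i : Nat => [(i : Int) - p.length - 1, (i : Int) - 2]) := by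
      refine List.mem_map.mpr ⟨p.length, ?_, rfl⟩
      rw [List.mem_filter]
      refine ⟨?_, by simpa using hPam⟩
      rw [show (p ++ '$' :: t).length - p.length = t.length + 1 from by omega,
        List.range'_succ]
      exact List.mem_cons_self
    rw [heq] at hmem
    obtain ⟨j, hjf, hfb⟩ := List.mem_map.mp hmem
    have hj : (j : Int) = (p.length : Int) - p.length - 1 := by injection hfb
    omega
  · have hd1 := hd.resolve_right hd2
    obtain ⟨u, v, hT⟩ := hd1
    have hTlen : t.length = u.length + (p.length + 1) + v.length := by
      have h0 := congrArg List.length hT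
      simp at h0
      omega
    have hPamF : ¬ ((z_values (p ++ '$' :: t)).getD p.length 0 = (p.length : Int)) :=
      fun h => hd2 ((Pam_iff p t).mp h)
    rw [show (p ++ '$' :: t).length - p.length = t.length + 1 from by omega,
      List.range'_succ, List.filter_cons_of_neg (by simpa using hPamF)]
    rw [show List.range' (p.length + 1) t.length
        = (List.range t.length).map (fun j => p.length + 1 + j) from by
      rw [List.range'_eq_map_range]]
    rw [List.filter_map, List.map_map]
    rw [show ∀ xs : List Nat,
        xs.map ((fun i : Nat => [(i : Int) - p.length - 1, (i : Int) - 2]) ∘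
          (fun j : Nat => p.length + 1 + j))
        = xs.map (fun j : Nat => [(j : Int), (j : Int) + p.length - 1]) from fun xs => by
      apply List.map_congr_left
      intro j _
      simp only [Function.comp_apply]
      have h1 : ((p.length + 1 + j : Nat) : Int) - p.length - 1 = (j : Int) := by
        push_cast; ring
      have h2 : ((p.length + 1 + j : Nat) : Int) - 2 = (j : Int) + p.length - 1 := by
        push_cast; ring
      rw [h1, h2]]
    intro heq
    have hinj : Function.Injective (fun j : Nat => [(j : Int), (j : Int) + p.length - 1]) := by
      intro a b h
      simp only [List.cons.injEq] at h
      exact_mod_cast h.1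
    have hfil := List.map_injective_iff.mpr hinj heq
    have hdropj0 : t.drop u.length = p ++ '$' :: v := by
      rw [← hT, List.append_assoc, List.drop_left]
      simp
    have hj0 : u.length < t.length := by omega
    have hmem_b : u.length ∈ ((List.range t.length).filter
        (fun start => decide ((t.drop start).take p.length = p))) := by
      rw [List.mem_filter]
      refine ⟨List.mem_range.mpr hj0, ?_⟩
      rw [hdropj0]
      simp [List.take_left]
    rw [← hfil, List.mem_filter] at hmem_b
    have hqa := hmem_b.2
    simp only [Function.comp_apply, decide_eq_true_eq] at hqa
    rw [match_cond p t u.length hj0] at hqa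
    exact hqa.2 (by rw [hdropj0]; exact s_getm p v)

theorem z_alg_eq_alt (pattern text : String) (hD : ¬ D_z_alg pattern text) :
    z_alg pattern text = z_alg_alt pattern text := by
  unfold D_z_alg at hD
  rw [dollarScan_iff, List.isPrefixOf_iff_prefix, isPrefixOf_false_iff] at hD
  rw [not_or] at hD
  simp only [z_alg, z_alg_alt]
  exact main_lists pattern.toList text.toList hD.1 hD.2

-- ===== VERDICT (by name: the statement is the Claim_ definition above) =====
theorem z_alg_spec : Claim_unchanged_z_alg := by
  intro pattern text _ hD
  exact (z_alg_eq_alt pattern text hD).symm ▸ rfl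

theorem z_alg_changed : Claim_changed_z_alg := by
  unfold Claim_changed_z_alg
  refine ⟨by decide, by decide, ?_, by decide, by decide⟩
  show z_alg "$" "" = [[-1, -1]]
  have he : zExtend ['$','$'] 1 1 = 2 := by
    rw [zExtend.eq_def]; norm_num; rw [zExtend.eq_def]; norm_num
  have hl : zLoop ['$','$'] 2 [2,0] 0 0 1 = [2,1] := by
    rw [zLoop.eq_def]; norm_num [he]; rw [zLoop.eq_def]; norm_num
  have hs : ("$".toList : List Char) = ['$'] := by decide
  simp only [z_alg, z_values, hs]
  norm_num [show (List.replicate 2 (0:Int)).set 0 2 = [2,0] from rfl, hl]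

theorem z_alg_tight : Claim_exact_z_alg := by
  intro pattern text _ hD
  unfold D_z_alg at hD
  rw [dollarScan_iff, List.isPrefixOf_iff_prefix, isPrefixOf_false_iff] at hD
  simp only [z_alg, z_alg_alt]
  exact tight_lists pattern.toList text.toList hD
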